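-- pv_equiv track=rewrite | github.com/ChoiHongYeon/python_programmers_Lv.0 | 20240331-5.py | solution
-- ===== SOURCE A (Python) =====
-- def solution(arr):
--     stk = []
--     i=0
--     while i<len(arr):
--         if stk==[]:
--             stk.append(arr[i])
--             i+=1
--         else:
--             if stk[len(stk)-1]<arr[i]:
--                 stk.append(arr[i])
--                 i+=1
--             else:
--                 stk.pop()
--     return stk
-- ===== SOURCE B (Python) =====
-- def solution(arr):
--     # one right-to-left pass: keep x iff it is smaller than everything to its right
--     res = []
--     for x in reversed(arr):
--         if not res or x < res[-1]:
--             res.append(x)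
--     res.reverse()
--     return res
-- ===== Notes on version B (the rewrite author's own statement) =====
-- stated objective: simpler
-- what changed: Replaces the stack with cascading pops (and an index that does not advance on a pop) by a single right-to-left pass that keeps an element exactly when it is smaller than the current suffix minimum, then reverses the result.
import Mathlib
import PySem

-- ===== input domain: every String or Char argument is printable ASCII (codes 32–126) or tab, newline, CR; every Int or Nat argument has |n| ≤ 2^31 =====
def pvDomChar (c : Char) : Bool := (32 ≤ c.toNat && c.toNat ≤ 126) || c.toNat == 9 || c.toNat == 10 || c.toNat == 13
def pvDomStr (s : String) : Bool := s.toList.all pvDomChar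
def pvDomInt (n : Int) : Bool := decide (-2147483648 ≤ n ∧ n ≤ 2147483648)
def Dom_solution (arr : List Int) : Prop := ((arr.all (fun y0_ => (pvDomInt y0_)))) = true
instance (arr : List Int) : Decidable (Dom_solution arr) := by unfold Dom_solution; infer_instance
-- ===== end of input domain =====

-- B replaces A's stack with cascading pops by a single right-to-left suffix-minimum scan (simpler, linear instead of the same linear with pop bookkeeping).

-- ===== PORT A =====
-- while loop of A: stk is the Python stack with its TOP at the HEAD of the list
-- (append = cons, pop = tail, stk[len(stk)-1] = head); returned bottom-to-top via reverse.
def solLoop (arr : List Int) (stk : List Int) (i : Nat) : List Int :=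
  if h : i < arr.length then
    match stk with
    | [] => solLoop arr [arr[i]] (i + 1)
    | t :: rest =>
        if t < arr[i] then solLoop arr (arr[i] :: t :: rest) (i + 1)
        else solLoop arr rest i
  else stk
termination_by 2 * (arr.length - i) + stk.length
decreasing_by all_goals (simp only [List.length_cons, List.length_nil]; omega)

def solution (arr : List Int) : List Int := (solLoop arr [] 0).reverse

-- ===== PORT B =====
-- for x in reversed(arr): append x iff res empty or x < res[-1]; then reverse res.
def altStep (res : List Int) (x : Int) : List Int :=
  match res.getLast? with
  | none => res ++ [x]
  | some t => if x < t then res ++ [x] else res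

def solution_alt (arr : List Int) : List Int :=
  (arr.reverse.foldl altStep []).reverse

-- ===== PRECONDITION & SPEC =====
def Spec_solution (arr : List Int) (out : List Int) : Prop := out = solution_alt arr
instance (arr : List Int) (out : List Int) : Decidable (Spec_solution arr out) := by unfold Spec_solution; infer_instance

-- ===== CLAIM (what is proved, stated in full; the proofs are below) =====
def Claim_equal_solution : Prop := ∀ (arr : List Int), Dom_solution arr → Spec_solution arr (solution arr)

-- ===== LEMMAS AND PROOFS =====

-- reference version: survivors of the suffix-minimum scan, in original (left-to-right) order
def sufMin : List Int → List Int
  | [] => []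
  | x :: xs =>
    match sufMin xs with
    | [] => [x]
    | t :: r => if x < t then x :: t :: r else t :: r

-- cons-based step (acc is the reverse of Source B's res)
def altStep' (acc : List Int) (x : Int) : List Int :=
  match acc with
  | [] => [x]
  | t :: _ => if x < t then x :: acc else acc

theorem altStep_reverse (res : List Int) (x : Int) :
    altStep res x = (altStep' res.reverse x).reverse := by
  cases h : res.reverse with
  | nil =>
      have : res = [] := by simpa using congrArg List.reverse h
      subst this; simp [altStep, altStep']
  | cons t r =>
      have hl : res.getLast? = some t := by
        rw [← List.head?_reverse, h]; rfl
      simp only [altStep, altStep', hl]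
      split
      · have : res ++ [x] = (x :: t :: r).reverse := by
          rw [← h]; simp
        simp [this]
      · simp [← h]

theorem foldl_altStep_reverse (l : List Int) (res : List Int) :
    l.foldl altStep res = (l.foldl altStep' res.reverse).reverse := by
  induction l generalizing res with
  | nil => simp
  | cons x xs ih =>
      simp only [List.foldl_cons, altStep_reverse, ih, List.reverse_reverse]

theorem foldr_eq_sufMin (arr : List Int) :
    arr.foldr (fun x acc => altStep' acc x) [] = sufMin arr := by
  induction arr with
  | nil => rfl
  | cons x xs ih =>
      rw [List.foldr_cons, ih]
      show altStep' (sufMin xs) x = _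
      simp only [sufMin]
      cases h : sufMin xs <;> simp [altStep']

theorem alt_eq_sufMin (arr : List Int) : solution_alt arr = sufMin arr := by
  rw [solution_alt, foldl_altStep_reverse, List.reverse_nil, List.foldl_reverse,
    List.reverse_reverse, foldr_eq_sufMin]

-- head of sufMin s is a minimum of s (when s ≠ [])
theorem sufMin_head_min (s : List Int) (hs : s ≠ []) :
    ∃ m r, sufMin s = m :: r ∧ m ∈ s ∧ ∀ y ∈ s, m ≤ y := by
  induction s with
  | nil => exact absurd rfl hs
  | cons x xs ih =>
      cases hxs : xs with
      | nil => exact ⟨x, [], by simp [sufMin], by simp, by simp⟩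
      | cons a b =>
          obtain ⟨m, r, hE, hM, hMin⟩ := ih (by simp [hxs])
          rw [← hxs] at *
          by_cases hlt : x < m
          · refine ⟨x, m :: r, ?_, by simp, ?_⟩
            · simp [sufMin, hE, hlt]
            · intro y hy
              rcases List.mem_cons.mp hy with h | h
              · omega
              · have := hMin y h; omega
          · refine ⟨m, r, ?_, List.mem_cons_of_mem _ hM, ?_⟩
            · simp [sufMin, hE, hlt]
            · intro y hy
              rcases List.mem_cons.mp hy with h | h
              · omega
              · exact hMin y h

-- one step of A's cascade of pops, as a function (top of stack at head)
def popPush : List Int → Int → List Int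
  | [], x => [x]
  | t :: rest, x => if t < x then x :: t :: rest else popPush rest x

-- on a strictly decreasing stack, popPush pops exactly the elements ≥ x
theorem popPush_filter (stk : List Int) (x : Int)
    (hs : stk.Pairwise (· > ·)) :
    popPush stk x = x :: stk.filter (fun t => decide (t < x)) := by
  induction stk with
  | nil => rfl
  | cons t rest ih =>
      rcases List.pairwise_cons.mp hs with ⟨hgt, hrest⟩
      by_cases hlt : t < x
      · have : ∀ u ∈ rest, u < x := fun u hu => by have := hgt u hu; omega
        simp only [popPush, if_pos hlt, List.filter_cons,
          decide_eq_true hlt, if_pos]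
        congr 1
        simp only [List.cons.injEq, true_and]
        exact (List.filter_eq_self.mpr (fun u hu => decide_eq_true (this u hu))).symm
      · simp only [popPush, if_neg hlt, List.filter_cons]
        rw [ih hrest]
        simp [hlt]

-- main invariant: folding A's pop-push over s starting from a strictly decreasing
-- stack yields the suffix-min survivors of s (reversed, top at head) on top of the
-- elements of stk that are smaller than everything in s
theorem foldl_popPush (s : List Int) (stk : List Int)
    (hs : stk.Pairwise (· > ·)) :
    s.foldl popPush stk =
      (sufMin s).reverse ++ stk.filter (fun t => decide (∀ y ∈ s, t < y)) := by
  induction s generalizing stk with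
  | nil =>
      simp [sufMin]
  | cons x s' ih =>
      have hstep : popPush stk x = x :: stk.filter (fun t => decide (t < x)) :=
        popPush_filter stk x hs
      have hsorted : (x :: stk.filter (fun t => decide (t < x))).Pairwise (· > ·) := by
        refine List.pairwise_cons.mpr ⟨?_, hs.filter _⟩
        intro u hu
        have := (List.mem_filter.mp hu).2
        simpa using of_decide_eq_true this
      simp only [List.foldl_cons, hstep, ih _ hsorted]
      have hcong : ∀ t : Int,
          (decide (∀ y ∈ s', t < y) && decide (t < x)) = decide (∀ y ∈ x :: s', t < y) := by
        intro t
        by_cases h1 : (∀ y ∈ s', t < y) <;> by_cases h2 : t < x <;> simp [h1, h2]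
      have hfilter :
          (x :: stk.filter (fun t => decide (t < x))).filter
              (fun t => decide (∀ y ∈ s', t < y)) =
            (if (∀ y ∈ s', x < y) then [x] else []) ++
              stk.filter (fun t => decide (∀ y ∈ x :: s', t < y)) := by
        rw [List.filter_cons, List.filter_filter,
          List.filter_congr (fun t _ => hcong t)]
        by_cases hall : ∀ y ∈ s', x < y
        · rw [if_pos (by simpa using hall), if_pos hall]; rfl
        · rw [if_neg (by simpa using hall), if_neg hall]; rfl
      rw [hfilter, ← List.append_assoc]
      congr 1
      by_cases hs'nil : s' = []
      · subst hs'nil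
        simp [sufMin]
      · obtain ⟨m, r', hE', hM, hMin⟩ := sufMin_head_min s' hs'nil
        by_cases hall : ∀ y ∈ s', x < y
        · rw [if_pos hall]
          have hxm : x < m := hall m hM
          simp [sufMin, hE', hxm]
        · rw [if_neg hall]
          have hxm : ¬ x < m := fun hx => hall (fun y hy => lt_of_lt_of_le hx (hMin y hy))
          simp [sufMin, hE', hxm]

-- A's while loop equals the fold of popPush over the remaining suffix
theorem solLoop_eq_foldl (arr : List Int) (stk : List Int) (i : Nat) :
    solLoop arr stk i = (arr.drop i).foldl popPush stk := by
  induction stk, i using solLoop.induct (arr := arr) with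
  | case1 i h ih =>
      rw [solLoop, dif_pos h, ih,
        List.drop_eq_getElem_cons h]
      rfl
  | case2 i h t rest hlt ih =>
      rw [solLoop, dif_pos h]
      simp only [if_pos hlt]
      rw [ih]
      conv_rhs => rw [List.drop_eq_getElem_cons h, List.foldl_cons]
      simp [popPush, hlt]
  | case3 i h t rest hlt ih =>
      rw [solLoop, dif_pos h]
      simp only [if_neg hlt]
      rw [ih, List.drop_eq_getElem_cons h, List.foldl_cons, List.foldl_cons]
      simp [popPush, hlt]
  | case4 stk i h =>
      rw [solLoop, dif_neg h, List.drop_eq_nil_of_le (by omega)]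
      rfl

-- ===== VERDICT (by name: the statement is the Claim_ definition above) =====
theorem solution_spec : Claim_equal_solution := by
  intro arr _
  show solution arr = solution_alt arr
  rw [solution, solLoop_eq_foldl, List.drop_zero,
    foldl_popPush arr [] (by simp), alt_eq_sufMin]
  simp
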